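-- pv_equiv track=rewrite | github.com/jpbascur/citation_clusters_evaluation | functions_merging.py | clean_Con_D
-- ===== SOURCE A (Python) =====
-- def clean_Con_D(jcon_d, jclu_d):
--     """Makes a connection dictionary that only contains the joined clusters and and have conection values for all of them (i.e. a clean version of jcon_d)
--
--     Parameters
--     ----------
--     jcon_d: dict of dict
--         Dictionary where the first level is the name of a given cluster, the second level is the name of another given cluster and the third level
--         is the number of edges between the clusters.
--
--     jclu_d: dict of tuple
--         Dictionary of clusters merged and clusters to merge where the first level is the name of the cluster and the second level
--         is the list of the name of the nodes in the cluster.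
--
--     Returns
--     -------
--     cjcon_d: dict of dict
--         Clean jcon_d.
--
--     Notes
--     -------
--     This step is necesary so jcon_d can be used in follow up clusterings.
--     """
--     cjcon_d = {}
--     for c_1 in list(jclu_d):  # Use the keys of jclu_d to make the keys in cjcon_d
--         cjcon_d[c_1] = {}
--         for c_2 in list(jclu_d):
--             if c_1 != c_2:  # Make sure you are not anotation links from the cluster to itself
--                 if c_1 not in jcon_d:  # If the cluster is not in jcon_d, then anotate it in cjcon_d with conection value 0 to the other clusters
--                     cjcon_d[c_1][c_2] = 0
--                 else:
--                     if c_2 not in jcon_d[c_1]: # Same as above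
--                         cjcon_d[c_1][c_2] = 0
--                     else:
--                         cjcon_d[c_1][c_2] = jcon_d[c_1][c_2]
--     return cjcon_d
-- ===== SOURCE B (Python) =====
-- def clean_Con_D(jcon_d, jclu_d):
--     """Zero-fill a dense matrix over jclu_d's keys, then overlay jcon_d's sparse entries."""
--     cjcon_d = {c_1: {c_2: 0 for c_2 in jclu_d if c_1 != c_2} for c_1 in jclu_d}
--     for c_1, row in jcon_d.items():
--         if c_1 in cjcon_d:
--             dest = cjcon_d[c_1]
--             for c_2, v in row.items():
--                 if c_2 in dest:
--                     dest[c_2] = v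
--     return cjcon_d
-- ===== Notes on version B (the rewrite author's own statement) =====
-- stated objective: alternative
-- what changed: A probes jcon_d for every (c_1, c_2) pair inside a double loop over jclu_d's keys; B first zero-fills the dense matrix with a comprehension and then overlays only jcon_d's existing entries in a separate sparse pass.
import Mathlib
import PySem

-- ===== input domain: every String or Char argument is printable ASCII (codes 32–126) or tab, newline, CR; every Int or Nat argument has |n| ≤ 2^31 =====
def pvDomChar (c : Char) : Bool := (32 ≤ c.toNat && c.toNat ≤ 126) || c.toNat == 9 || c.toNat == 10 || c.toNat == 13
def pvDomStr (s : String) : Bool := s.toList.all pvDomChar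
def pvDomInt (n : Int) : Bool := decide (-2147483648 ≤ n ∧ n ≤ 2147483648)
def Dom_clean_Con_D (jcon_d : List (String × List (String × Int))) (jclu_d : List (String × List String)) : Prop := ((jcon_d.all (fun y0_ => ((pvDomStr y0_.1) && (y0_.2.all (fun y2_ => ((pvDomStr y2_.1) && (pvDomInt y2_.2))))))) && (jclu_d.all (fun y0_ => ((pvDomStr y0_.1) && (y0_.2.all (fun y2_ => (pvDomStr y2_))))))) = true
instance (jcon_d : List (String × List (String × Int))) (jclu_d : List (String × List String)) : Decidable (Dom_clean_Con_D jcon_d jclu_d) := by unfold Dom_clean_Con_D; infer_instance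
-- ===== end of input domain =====

-- B replaces A's probe-every-pair double loop over jclu_d by a zero-filled dense matrix
-- followed by a sparse overlay of jcon_d's existing entries (objective: alternative decomposition).

-- ===== PORT A =====
-- A's dict arguments/results are PySem.Dicts built from the association lists (dict(...) at the boundary).
def clean_Con_D (jcon_d : List (String × List (String × Int))) (jclu_d : List (String × List String)) : List (String × List (String × Int)) :=
  let jcon : PySem.Dict String (PySem.Dict String Int) :=
    PySem.Dict.ofList (jcon_d.map (fun p => (p.1, PySem.Dict.ofList p.2)))
  let jclu : PySem.Dict String (List String) := PySem.Dict.ofList jclu_d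
  let cjcon : PySem.Dict String (PySem.Dict String Int) :=
    jclu.keys.foldl (fun cj c1 =>
      cj.insert c1 (jclu.keys.foldl (fun inner c2 =>
        if c1 != c2 then
          match jcon.get? c1 with
          | none => inner.insert c2 0
          | some d1 =>
            match d1.get? c2 with
            | none => inner.insert c2 0
            | some v => inner.insert c2 v
        else inner) PySem.Dict.empty)) PySem.Dict.empty
  cjcon.items.map (fun p => (p.1, p.2.items))

-- ===== PORT B =====
def clean_Con_D_alt (jcon_d : List (String × List (String × Int))) (jclu_d : List (String × List String)) : List (String × List (String × Int)) :=
  let jcon : PySem.Dict String (PySem.Dict String Int) :=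
    PySem.Dict.ofList (jcon_d.map (fun p => (p.1, PySem.Dict.ofList p.2)))
  let K := (PySem.Dict.ofList jclu_d : PySem.Dict String (List String)).keys
  let base : PySem.Dict String (PySem.Dict String Int) :=
    K.foldl (fun cj c1 =>
      cj.insert c1 (PySem.Dict.ofList ((K.filter (fun c2 => c1 != c2)).map (fun c2 => (c2, (0 : Int)))))) PySem.Dict.empty
  let final : PySem.Dict String (PySem.Dict String Int) :=
    jcon.items.foldl (fun cj pr =>
      if cj.contains pr.1 then
        cj.insert pr.1 (pr.2.items.foldl (fun d q =>
          if d.contains q.1 then d.insert q.1 q.2 else d) (cj.getD pr.1 PySem.Dict.empty))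
      else cj) base
  final.items.map (fun p => (p.1, p.2.items))

-- ===== PRECONDITION & SPEC =====
def Spec_clean_Con_D (jcon_d : List (String × List (String × Int))) (jclu_d : List (String × List String)) (out : List (String × List (String × Int))) : Prop := out = clean_Con_D_alt jcon_d jclu_d
instance (jcon_d : List (String × List (String × Int))) (jclu_d : List (String × List String)) (out : List (String × List (String × Int))) : Decidable (Spec_clean_Con_D jcon_d jclu_d out) := by unfold Spec_clean_Con_D; infer_instance

-- ===== CLAIM (what is proved, stated in full; the proofs are below) =====
def Claim_equal_clean_Con_D : Prop := ∀ (jcon_d : List (String × List (String × Int))) (jclu_d : List (String × List String)), Dom_clean_Con_D jcon_d jclu_d → Spec_clean_Con_D jcon_d jclu_d (clean_Con_D jcon_d jclu_d)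

-- ===== LEMMAS AND PROOFS =====

-- value A stores for the pair (c1, c2), read off jcon
def cdAvalD (jcon : PySem.Dict String (PySem.Dict String Int)) (c1 c2 : String) : Int :=
  match jcon.get? c1 with
  | none => 0
  | some d1 =>
    match d1.get? c2 with
    | none => 0
    | some v => v

-- shared canonical form of both outputs
def cdCanon (jcon_d : List (String × List (String × Int))) (jclu_d : List (String × List String)) : List (String × List (String × Int)) :=
  ((PySem.Dict.ofList jclu_d : PySem.Dict String (List String)).keys).map (fun c1 =>
    (c1, (((PySem.Dict.ofList jclu_d : PySem.Dict String (List String)).keys).filter (fun c2 => c1 != c2)).map (fun c2 =>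
      (c2, cdAvalD (PySem.Dict.ofList (jcon_d.map (fun p => (p.1, PySem.Dict.ofList p.2)))) c1 c2))))

theorem cd_lookup_eq_none {b : Type} (k : String) (l : List (String × b)) (h : k ∉ l.map Prod.fst) :
    List.lookup k l = none := by
  induction l with
  | nil => rfl
  | cons q t ih =>
    obtain ⟨a, v⟩ := q
    simp only [List.map_cons, List.mem_cons, not_or] at h
    rw [List.lookup_cons]
    have hne : (k == a) = false := by simpa using h.1
    simp [hne, ih h.2]

-- first-match lookup in a dict's items list is the dict's get?
theorem cd_lookup_items {v : Type} (d : PySem.Dict String v) (k : String) :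
    List.lookup k d.items = d.get? k := by
  obtain ⟨l⟩ := d
  induction l with
  | nil => rfl
  | cons q t ih =>
    obtain ⟨a, w⟩ := q
    dsimp only [PySem.Dict.items] at *
    rw [PySem.Dict.get?_mk_cons, List.lookup_cons]
    by_cases hk : k = a
    · subst hk; simp
    · have h1 : (k == a) = false := by simpa using hk
      have h2 : (a == k) = false := by simpa using Ne.symm hk
      simp only [h1, h2, if_false, Bool.false_eq_true]
      exact ih

-- items of ofList on a duplicate-free pair list is the list itself
theorem cd_items_ofList {v : Type} (l : List (String × v)) (h : (l.map Prod.fst).Nodup) :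
    (PySem.Dict.ofList l).items = l := by
  have h2 := PySem.Dict.items_foldl_insert_fresh l Prod.fst Prod.snd PySem.Dict.empty (fun a _ => rfl) h
  have e : PySem.Dict.ofList l = List.foldl (fun d a => d.insert a.1 a.2) PySem.Dict.empty l := rfl
  rw [e]
  simpa using h2

-- every value of a Dict built by an insert loop comes from the start dict or the inserted values
theorem cd_mem_values_foldl {v : Type} (l : List (String × v)) (d : PySem.Dict String v)
    (w : v) (hw : w ∈ (List.foldl (fun d p => d.insert p.1 p.2) d l).values) :
    w ∈ d.values ∨ w ∈ l.map Prod.snd := by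
  induction l generalizing d with
  | nil => exact Or.inl hw
  | cons q t ih =>
    rw [List.foldl_cons] at hw
    rcases ih (d.insert q.1 q.2) hw with h | h
    · rcases PySem.Dict.mem_values_insert d q.1 q.2 w h with h' | h'
      · right; simp [h']
      · left; exact h'
    · right; simp only [List.map_cons, List.mem_cons]; exact Or.inr h

-- an insert loop over fresh distinct keys records exactly the key/value pairs
theorem cd_outer_items {v : Type} (F : String → v) (K : List String) (hK : K.Nodup) :
    (List.foldl (fun cj c1 => cj.insert c1 (F c1)) PySem.Dict.empty K).items
      = K.map (fun c1 => (c1, F c1)) := by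
  have h := PySem.Dict.items_foldl_insert_fresh K (fun c1 => c1) F PySem.Dict.empty (fun a _ => rfl)
    (by simpa using hK)
  simpa using h

-- an overwrite-existing-keys loop rewrites each item of d0 by first-match lookup in r
theorem cd_foldl_overwrite_items {b g : Type} (G : String → b → g → g) (dflt : g)
    (r : List (String × b)) (d0 : PySem.Dict String g)
    (hr : (r.map Prod.fst).Nodup) (hd : d0.keys.Nodup) :
    (List.foldl (fun d q => if d.contains q.1 then d.insert q.1 (G q.1 q.2 (d.getD q.1 dflt)) else d) d0 r).items
      = d0.items.map (fun p => (p.1, match List.lookup p.1 r with | some w => G p.1 w p.2 | none => p.2)) := by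
  induction r generalizing d0 with
  | nil =>
    simp [List.lookup]
  | cons q t ih =>
    obtain ⟨qk, qv⟩ := q
    simp only [List.map_cons, List.nodup_cons] at hr
    rw [List.foldl_cons]
    dsimp only
    by_cases hc : d0.contains qk = true
    · rw [if_pos hc]
      have hk1 : (d0.insert qk (G qk qv (d0.getD qk dflt))).keys = d0.keys :=
        PySem.Dict.keys_insert_of_contains d0 (G qk qv (d0.getD qk dflt)) hc
      have hnd1 : (d0.insert qk (G qk qv (d0.getD qk dflt))).keys.Nodup := by rw [hk1]; exact hd
      rw [ih _ hr.2 hnd1]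
      rw [PySem.Dict.items_insert_of_contains d0 (G qk qv (d0.getD qk dflt)) hc]
      rw [List.map_map]
      apply List.map_congr_left
      intro p hp
      obtain ⟨a, c⟩ := p
      by_cases hpq : a = qk
      · subst hpq
        have hself : ((a, c).1 == a) = true := by simp
        have hgd : d0.getD a dflt = c := PySem.Dict.getD_of_mem_items d0 hp hd dflt
        have hlook : List.lookup a t = none := cd_lookup_eq_none a t hr.1
        simp only [Function.comp_apply, hself, if_true, List.lookup_cons, hlook, hgd]
      · have h1 : ((a, c).1 == qk) = false := by simpa using hpq
        simp only [Function.comp_apply, h1, Bool.false_eq_true, if_false, List.lookup_cons]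
    · rw [if_neg hc]
      rw [ih _ hr.2 hd]
      apply List.map_congr_left
      intro p hp
      have hpk : p.1 ∈ d0.keys := PySem.Dict.mem_keys_of_mem_items d0 hp
      have hne : (p.1 == qk) = false := by
        have hnp : ¬ p.1 = qk := by
          intro e
          apply hc
          rw [PySem.Dict.contains_iff_mem_keys]
          exact e ▸ hpk
        simpa using hnp
      rw [List.lookup_cons]
      simp [hne]

-- A's inner loop, as a map over the filtered key list
theorem cd_innerA_items (jcon : PySem.Dict String (PySem.Dict String Int)) (K : List String)
    (hK : K.Nodup) (c1 : String) :
    (List.foldl (fun inner c2 =>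
        if c1 != c2 then
          match jcon.get? c1 with
          | none => inner.insert c2 0
          | some d1 =>
            match d1.get? c2 with
            | none => inner.insert c2 0
            | some v => inner.insert c2 v
        else inner) PySem.Dict.empty K).items
      = (K.filter (fun c2 => c1 != c2)).map (fun c2 => (c2, cdAvalD jcon c1 c2)) := by
  have hbody : (fun (inner : PySem.Dict String Int) c2 =>
      if c1 != c2 then
        match jcon.get? c1 with
        | none => inner.insert c2 0
        | some d1 =>
          match d1.get? c2 with
          | none => inner.insert c2 0
          | some v => inner.insert c2 v
      else inner)
      = (fun (inner : PySem.Dict String Int) c2 =>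
          if c1 != c2 then inner.insert c2 (cdAvalD jcon c1 c2) else inner) := by
    funext inner c2
    by_cases hp : (c1 != c2) = true
    · rw [if_pos hp, if_pos hp]
      cases hj : jcon.get? c1 with
      | none => simp [cdAvalD, hj]
      | some d1 =>
        cases hd : d1.get? c2 with
        | none => simp [cdAvalD, hj, hd]
        | some v => simp [cdAvalD, hj, hd]
    · rw [if_neg hp, if_neg hp]
  rw [hbody]
  rw [← List.foldl_filter]
  have h := PySem.Dict.items_foldl_insert_fresh (K.filter (fun c2 => c1 != c2)) (fun c2 => c2)
    (fun c2 => cdAvalD jcon c1 c2) PySem.Dict.empty (fun a _ => rfl)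
    (by simpa using hK.filter _)
  simpa using h

-- A's output is the canonical form
theorem cd_A_eq (jcon_d : List (String × List (String × Int))) (jclu_d : List (String × List String)) :
    clean_Con_D jcon_d jclu_d = cdCanon jcon_d jclu_d := by
  simp only [clean_Con_D]
  rw [cd_outer_items _ _ (PySem.Dict.nodup_keys_ofList jclu_d)]
  rw [List.map_map]
  unfold cdCanon
  apply List.map_congr_left
  intro c1 _
  simp only [Function.comp_apply]
  rw [cd_innerA_items _ _ (PySem.Dict.nodup_keys_ofList jclu_d) c1]

-- B's output is the canonical form
theorem cd_B_eq (jcon_d : List (String × List (String × Int))) (jclu_d : List (String × List String)) :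
    clean_Con_D_alt jcon_d jclu_d = cdCanon jcon_d jclu_d := by
  simp only [clean_Con_D_alt]
  have hKnd : ((PySem.Dict.ofList jclu_d : PySem.Dict String (List String)).keys).Nodup :=
    PySem.Dict.nodup_keys_ofList jclu_d
  have hjnd : ((PySem.Dict.ofList (jcon_d.map (fun p => (p.1, PySem.Dict.ofList p.2))) :
      PySem.Dict String (PySem.Dict String Int)).items.map Prod.fst).Nodup :=
    PySem.Dict.nodup_keys_ofList _
  have hbase : ∀ F : String → PySem.Dict String Int,
      (List.foldl (fun cj c1 => cj.insert c1 (F c1)) PySem.Dict.empty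
        ((PySem.Dict.ofList jclu_d : PySem.Dict String (List String)).keys)).keys.Nodup := by
    intro F
    exact PySem.Dict.nodup_keys_foldl_insert _ (fun _ x => F x) _ (by simp [PySem.Dict.empty, PySem.Dict.keys])
  have hov := cd_foldl_overwrite_items
    (fun c1 row cur => List.foldl (fun d q => if d.contains q.1 then d.insert q.1 q.2 else d) cur row.items)
    (PySem.Dict.empty)
    ((PySem.Dict.ofList (jcon_d.map (fun p => (p.1, PySem.Dict.ofList p.2))) :
      PySem.Dict String (PySem.Dict String Int)).items)
    (List.foldl (fun cj c1 => cj.insert c1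
        (PySem.Dict.ofList ((((PySem.Dict.ofList jclu_d : PySem.Dict String (List String)).keys).filter
          (fun c2 => c1 != c2)).map (fun c2 => (c2, (0 : Int)))))) PySem.Dict.empty
      ((PySem.Dict.ofList jclu_d : PySem.Dict String (List String)).keys))
    hjnd (hbase _)
  simp only [] at hov
  rw [hov]
  rw [cd_outer_items _ _ hKnd]
  rw [List.map_map, List.map_map]
  unfold cdCanon
  apply List.map_congr_left
  intro c1 _
  simp only [Function.comp_apply]
  rw [cd_lookup_items]
  cases hj : (PySem.Dict.ofList (jcon_d.map (fun p => (p.1, PySem.Dict.ofList p.2))) :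
      PySem.Dict String (PySem.Dict String Int)).get? c1 with
  | none =>
    rw [cd_items_ofList _ (by
      have hcmp : (Prod.fst ∘ fun c2 : String => (c2, (0 : Int))) = id := by funext c2; rfl
      rw [List.map_map, hcmp, List.map_id]
      exact hKnd.filter _)]
    congr 1
    apply List.map_congr_left
    intro c2 _
    simp [cdAvalD, hj]
  | some row =>
    have hrownd : (row.items.map Prod.fst).Nodup := by
      have hmem : (c1, row) ∈ (PySem.Dict.ofList (jcon_d.map (fun p => (p.1, PySem.Dict.ofList p.2))) :
          PySem.Dict String (PySem.Dict String Int)).items :=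
        PySem.Dict.mem_items_of_get?_eq_some _ hj
      have hval : row ∈ (PySem.Dict.ofList (jcon_d.map (fun p => (p.1, PySem.Dict.ofList p.2))) :
          PySem.Dict String (PySem.Dict String Int)).values := by
        simp only [PySem.Dict.values]
        exact List.mem_map.mpr ⟨(c1, row), hmem, rfl⟩
      have hval' : row ∈ (List.foldl (fun d p => d.insert p.1 p.2) PySem.Dict.empty
          ((jcon_d.map (fun p => (p.1, PySem.Dict.ofList p.2)) : List (String × PySem.Dict String Int)))).values := hval
      rcases cd_mem_values_foldl _ _ _ hval' with h | h
      · simp [PySem.Dict.values, PySem.Dict.empty] at h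
      · rw [List.map_map] at h
        obtain ⟨p, _, hpe⟩ := List.mem_map.mp h
        have : row = PySem.Dict.ofList p.2 := hpe.symm
        rw [this]
        exact PySem.Dict.nodup_keys_ofList _
    have hznd : (PySem.Dict.ofList ((((PySem.Dict.ofList jclu_d : PySem.Dict String (List String)).keys).filter
        (fun c2 => c1 != c2)).map (fun c2 => (c2, (0 : Int))))).keys.Nodup :=
      PySem.Dict.nodup_keys_ofList _
    have hov2 := cd_foldl_overwrite_items (fun _ w _ => w) (0 : Int) row.items
      (PySem.Dict.ofList ((((PySem.Dict.ofList jclu_d : PySem.Dict String (List String)).keys).filter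
        (fun c2 => c1 != c2)).map (fun c2 => (c2, (0 : Int))))) hrownd hznd
    simp only [] at hov2
    rw [hov2]
    rw [cd_items_ofList _ (by
      have hcmp : (Prod.fst ∘ fun c2 : String => (c2, (0 : Int))) = id := by funext c2; rfl
      rw [List.map_map, hcmp, List.map_id]
      exact hKnd.filter _)]
    rw [List.map_map]
    congr 1
    apply List.map_congr_left
    intro c2 _
    simp only [Function.comp_apply]
    rw [cd_lookup_items]
    cases hd : row.get? c2 with
    | none => simp [cdAvalD, hj, hd]
    | some v => simp [cdAvalD, hj, hd]

-- ===== VERDICT (by name: the statement is the Claim_ definition above) =====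
theorem clean_Con_D_spec : Claim_equal_clean_Con_D := by
  intro jcon_d jclu_d _
  show clean_Con_D jcon_d jclu_d = clean_Con_D_alt jcon_d jclu_d
  rw [cd_A_eq, cd_B_eq]
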